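-- pv_equiv track=rewrite | github.com/Rawana13/Homework-5 | .agents/skills/datetime-converter/scripts/datetime_convert.py | gregorian_to_hijri
-- ===== SOURCE A (Python) =====
-- ISLAMIC_EPOCH_JDN = 1_948_438  # Thursday epoch: 1 Muharram 1 AH = JDN 1,948,438
--
-- DAYS_PER_CYCLE = 10_631         # 30 Hijri years = 10,631 days (19×354 + 11×355)
--
-- LEAP_POSITIONS = frozenset({2, 5, 7, 10, 13, 15, 18, 21, 24, 26, 29})
--
-- def _gregorian_to_jdn(year: int, month: int, day: int) -> int:
--     """Convert a proleptic Gregorian date to its Julian Day Number."""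
--     a = (14 - month) // 12
--     y = year + 4800 - a
--     m = month + 12 * a - 3
--     return (
--         day
--         + (153 * m + 2) // 5
--         + 365 * y
--         + y // 4
--         - y // 100
--         + y // 400
--         - 32045
--     )
--
-- def _is_hijri_leap(year: int) -> bool:
--     return (year % 30) in LEAP_POSITIONS
--
-- def _days_in_hijri_year(year: int) -> int:
--     return 355 if _is_hijri_leap(year) else 354
--
-- def _days_in_hijri_month(year: int, month: int) -> int:
--     # Odd months have 30 days; even months have 29 days.
--     # Exception: month 12 (Dhul Hijjah) has 30 days in a leap year.
--     if month % 2 == 1: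
--         return 30
--     if month == 12 and _is_hijri_leap(year):
--         return 30
--     return 29
--
-- def gregorian_to_hijri(year: int, month: int, day: int) -> tuple[int, int, int]:
--     """
--     Convert a Gregorian date to Hijri using the tabular 30-year cycle.
--
--     Returns (hijri_year, hijri_month, hijri_day).
--     Raises ValueError for dates before the Islamic epoch (622 CE).
--     """
--     jdn = _gregorian_to_jdn(year, month, day)
--     days_elapsed = jdn - ISLAMIC_EPOCH_JDN
--
--     if days_elapsed < 0:
--         raise ValueError(
--             f"{year:04d}-{month:02d}-{day:02d} precedes the Islamic calendar epoch (622 CE)."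
--         )
--
--     # Split into complete 30-year cycles and remainder days
--     num_cycles, day_in_cycle = divmod(days_elapsed, DAYS_PER_CYCLE)
--     hijri_year = num_cycles * 30
--
--     # Walk years within current cycle
--     for y_offset in range(1, 31):
--         y_len = _days_in_hijri_year(hijri_year + y_offset)
--         if day_in_cycle < y_len:
--             hijri_year += y_offset
--             break
--         day_in_cycle -= y_len
--
--     # Walk months within current year
--     hijri_month = 12  # fallback (should always be set by loop)
--     day_in_year = day_in_cycle
--     for m in range(1, 13):
--         m_len = _days_in_hijri_month(hijri_year, m)
--         if day_in_year < m_len: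
--             hijri_month = m
--             break
--         day_in_year -= m_len
--
--     hijri_day = day_in_year + 1
--     return hijri_year, hijri_month, hijri_day
-- ===== SOURCE B (Python) =====
-- ISLAMIC_EPOCH_JDN = 1_948_438
-- DAYS_PER_CYCLE = 10_631
--
-- def _gregorian_to_jdn(year: int, month: int, day: int) -> int:
--     a = (14 - month) // 12
--     y = year + 4800 - a
--     m = month + 12 * a - 3
--     return (
--         day
--         + (153 * m + 2) // 5
--         + 365 * y
--         + y // 4
--         - y // 100
--         + y // 400
--         - 32045
--     )
--
-- def gregorian_to_hijri(year: int, month: int, day: int) -> tuple[int, int, int]: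
--     jdn = _gregorian_to_jdn(year, month, day)
--     days_elapsed = jdn - ISLAMIC_EPOCH_JDN
--     if days_elapsed < 0:
--         raise ValueError(
--             f"{year:04d}-{month:02d}-{day:02d} precedes the Islamic calendar epoch (622 CE)."
--         )
--     num_cycles, r = divmod(days_elapsed, DAYS_PER_CYCLE)
--     # in-cycle year 1..30, closed form for the tabular leap pattern
--     y = (30 * r + 10645) // 10631
--     day_in_year = r - (354 * (y - 1) + (11 * (y - 1) + 15) // 30)
--     if day_in_year >= 325:
--         hijri_month = 12
--         hijri_day = day_in_year - 324
--     else: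
--         hijri_month = (2 * day_in_year) // 59 + 1
--         hijri_day = day_in_year - (59 * (hijri_month - 1) + 1) // 2 + 1
--     return num_cycles * 30 + y, hijri_month, hijri_day
-- ===== Notes on version B (the rewrite author's own statement) =====
-- stated objective: simpler
-- what changed: B keeps the JDN conversion and epoch check but replaces A's two walking loops (year within the 30-year cycle, month within the year) with closed-form floor-division arithmetic for the tabular leap pattern and the alternating 30/29 month lengths.
import Mathlib
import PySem

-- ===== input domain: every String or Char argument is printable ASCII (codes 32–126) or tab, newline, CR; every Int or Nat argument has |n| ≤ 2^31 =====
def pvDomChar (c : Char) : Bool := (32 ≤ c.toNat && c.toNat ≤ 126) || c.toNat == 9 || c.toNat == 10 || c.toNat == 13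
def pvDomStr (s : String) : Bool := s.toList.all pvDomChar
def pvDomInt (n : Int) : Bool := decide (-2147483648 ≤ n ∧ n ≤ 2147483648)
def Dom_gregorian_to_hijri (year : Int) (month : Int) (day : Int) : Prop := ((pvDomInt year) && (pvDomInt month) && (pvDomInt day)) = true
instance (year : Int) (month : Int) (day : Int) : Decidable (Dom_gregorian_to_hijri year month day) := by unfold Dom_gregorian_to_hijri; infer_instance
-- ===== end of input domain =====

-- B replaces A's two walking loops (year within the 30-year cycle, month within the
-- year) by closed-form floor-division arithmetic; objective: simpler (no loops).

-- ===== PORT A =====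
-- _gregorian_to_jdn (helper appearing verbatim in both Source A and Source B)
def pvJdn (year : Int) (month : Int) (day : Int) : Int :=
  let a := PySem.Int.floordiv (14 - month) 12
  let y := year + 4800 - a
  let m := month + 12 * a - 3
  day + PySem.Int.floordiv (153 * m + 2) 5 + 365 * y
    + PySem.Int.floordiv y 4 - PySem.Int.floordiv y 100 + PySem.Int.floordiv y 400 - 32045

-- _is_hijri_leap : (year % 30) in LEAP_POSITIONS
def pvIsLeap (year : Int) : Bool :=
  let r := PySem.Int.mod year 30
  r == 2 || r == 5 || r == 7 || r == 10 || r == 13 || r == 15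
    || r == 18 || r == 21 || r == 24 || r == 26 || r == 29

-- _days_in_hijri_year
def pvDaysInYear (year : Int) : Int := if pvIsLeap year then 355 else 354

-- _days_in_hijri_month
def pvDaysInMonth (year : Int) (month : Int) : Int :=
  if PySem.Int.mod month 2 == 1 then 30
  else if month == 12 && pvIsLeap year then 30
  else 29

-- the 'for y_offset in range(1, 31)' walk with break; state = (hijri_year, day_in_cycle)
def pvYearWalk : List Int → Int → Int → Int × Int
  | [], hy, dic => (hy, dic)
  | o :: rest, hy, dic =>
    if dic < pvDaysInYear (hy + o) then (hy + o, dic)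
    else pvYearWalk rest hy (dic - pvDaysInYear (hy + o))

-- the 'for m in range(1, 13)' walk with break and fallback month 12
def pvMonthWalk : List Int → Int → Int → Int × Int
  | [], _, diy => (12, diy)
  | m :: rest, hy, diy =>
    if diy < pvDaysInMonth hy m then (m, diy)
    else pvMonthWalk rest hy (diy - pvDaysInMonth hy m)

def gregorian_to_hijri (year : Int) (month : Int) (day : Int) : Int × Int × Int :=
  let jdn := pvJdn year month day
  let daysElapsed := jdn - 1948438
  let numCycles := PySem.Int.floordiv daysElapsed 10631
  let dayInCycle := PySem.Int.mod daysElapsed 10631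
  let p := pvYearWalk (PySem.List.pyRange 1 31 1) (numCycles * 30) dayInCycle
  let q := pvMonthWalk (PySem.List.pyRange 1 13 1) p.1 p.2
  (p.1, q.1, q.2 + 1)

-- ===== PORT B =====
def gregorian_to_hijri_alt (year : Int) (month : Int) (day : Int) : Int × Int × Int :=
  let jdn := pvJdn year month day
  let days := jdn - 1948438
  let cycles := PySem.Int.floordiv days 10631
  let r := PySem.Int.mod days 10631
  let y := PySem.Int.floordiv (30 * r + 10645) 10631
  let dayInYear := r - (354 * (y - 1) + PySem.Int.floordiv (11 * (y - 1) + 15) 30)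
  if 325 ≤ dayInYear then
    (cycles * 30 + y, 12, dayInYear - 324)
  else
    let hm := PySem.Int.floordiv (2 * dayInYear) 59 + 1
    (cycles * 30 + y, hm, dayInYear - PySem.Int.floordiv (59 * (hm - 1) + 1) 2 + 1)

-- ===== PRECONDITION & SPEC =====
-- A raises ValueError for dates before the Islamic epoch (JDN < 1948438); B raises the
-- same error there, so exactly those inputs are excluded.
def Pre_gregorian_to_hijri (year : Int) (month : Int) (day : Int) : Prop :=
  0 ≤ pvJdn year month day - 1948438
instance (year : Int) (month : Int) (day : Int) : Decidable (Pre_gregorian_to_hijri year month day) := by unfold Pre_gregorian_to_hijri; infer_instance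

def pvWitness_gregorian_to_hijri : Int × Int × Int := (2000, 1, 1)

def Spec_gregorian_to_hijri (year : Int) (month : Int) (day : Int) (out : Int × Int × Int) : Prop := out = gregorian_to_hijri_alt year month day
instance (year : Int) (month : Int) (day : Int) (out : Int × Int × Int) : Decidable (Spec_gregorian_to_hijri year month day out) := by unfold Spec_gregorian_to_hijri; infer_instance

-- ===== CLAIM (what is proved, stated in full; the proofs are below) =====
def Claim_equal_gregorian_to_hijri : Prop := ∀ (year : Int) (month : Int) (day : Int), Dom_gregorian_to_hijri year month day → Pre_gregorian_to_hijri year month day → Spec_gregorian_to_hijri year month day (gregorian_to_hijri year month day)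

-- ===== LEMMAS AND PROOFS =====

-- leap status depends on the year only modulo 30
theorem pvIsLeap_shift (c k : Int) : pvIsLeap (30 * c + k) = pvIsLeap k := by
  have h : PySem.Int.mod (30 * c + k) 30 = PySem.Int.mod k 30 := by
    rw [PySem.Int.mod_eq_emod_of_pos (by norm_num), PySem.Int.mod_eq_emod_of_pos (by norm_num)]
    omega
  simp only [pvIsLeap, h]

theorem pvDaysInYear_shift (c k : Int) : pvDaysInYear (30 * c + k) = pvDaysInYear k := by
  simp [pvDaysInYear, pvIsLeap_shift]

theorem pvDaysInMonth_shift (c k m : Int) :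
    pvDaysInMonth (30 * c + k) m = pvDaysInMonth k m := by
  simp [pvDaysInMonth, pvIsLeap_shift]

-- stripping the whole-cycle part off the year walk
theorem pvYearWalk_shift (os : List Int) (c b dic : Int) :
    pvYearWalk os (30 * c + b) dic =
      ((pvYearWalk os b dic).1 + 30 * c, (pvYearWalk os b dic).2) := by
  induction os generalizing dic with
  | nil => simp [pvYearWalk]; ring
  | cons o rest ih =>
    have hl : pvDaysInYear (30 * c + b + o) = pvDaysInYear (b + o) := by
      have := pvDaysInYear_shift c (b + o); rw [← this]; ring_nf
    simp only [pvYearWalk, hl]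
    split
    · simp; ring
    · exact ih _

-- the month walk only sees the year through its leap status
theorem pvMonthWalk_shift (os : List Int) (c k diy : Int) :
    pvMonthWalk os (30 * c + k) diy = pvMonthWalk os k diy := by
  induction os generalizing diy with
  | nil => simp [pvMonthWalk]
  | cons m rest ih =>
    simp only [pvMonthWalk, pvDaysInMonth_shift]
    split
    · rfl
    · exact ih _

theorem pvLeap_iff (z : Int) : pvIsLeap z = true ↔
    (z % 30 = 2 ∨ z % 30 = 5 ∨ z % 30 = 7 ∨ z % 30 = 10 ∨ z % 30 = 13 ∨ z % 30 = 15
      ∨ z % 30 = 18 ∨ z % 30 = 21 ∨ z % 30 = 24 ∨ z % 30 = 26 ∨ z % 30 = 29) := by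
  have e : PySem.Int.mod z 30 = z % 30 := PySem.Int.mod_eq_emod_of_pos (by norm_num)
  simp only [pvIsLeap, e, Bool.or_eq_true, beq_iff_eq]
  tauto

theorem pvRng31 : PySem.List.pyRange 1 31 1 =
    [1,2,3,4,5,6,7,8,9,10,11,12,13,14,15,16,17,18,19,20,21,22,23,24,25,26,27,28,29,30] := by decide

theorem pvRng13 : PySem.List.pyRange 1 13 1 = [1,2,3,4,5,6,7,8,9,10,11,12] := by decide

-- the year walk on the suffix starting at year k, one lemma per year
theorem pvYSeg30 (r : Int) (hs : 10277 ≤ r) (h1 : r < 10631) :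
    pvYearWalk [30] 0 (r - 10277) = ((30 * r + 10645) / 10631, r - (354 * ((30 * r + 10645) / 10631 - 1) + (11 * ((30 * r + 10645) / 10631 - 1) + 15) / 30)) := by
  rw [pvYearWalk, show pvDaysInYear ((0:Int) + 30) = 354 from by decide]
  rw [if_pos (by omega)]
  rw [Prod.mk.injEq]; omega

theorem pvYSeg29 (r : Int) (hs : 9922 ≤ r) (h1 : r < 10631) :
    pvYearWalk [29,30] 0 (r - 9922) = ((30 * r + 10645) / 10631, r - (354 * ((30 * r + 10645) / 10631 - 1) + (11 * ((30 * r + 10645) / 10631 - 1) + 15) / 30)) := by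
  rw [pvYearWalk, show pvDaysInYear ((0:Int) + 29) = 355 from by decide]
  by_cases hc : (r - 9922) < 355
  · rw [if_pos hc, Prod.mk.injEq]; omega
  · rw [if_neg hc, show (r - 9922) - 355 = r - 10277 from by omega]
    exact pvYSeg30 r (by omega) h1

theorem pvYSeg28 (r : Int) (hs : 9568 ≤ r) (h1 : r < 10631) :
    pvYearWalk [28,29,30] 0 (r - 9568) = ((30 * r + 10645) / 10631, r - (354 * ((30 * r + 10645) / 10631 - 1) + (11 * ((30 * r + 10645) / 10631 - 1) + 15) / 30)) := by
  rw [pvYearWalk, show pvDaysInYear ((0:Int) + 28) = 354 from by decide]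
  by_cases hc : (r - 9568) < 354
  · rw [if_pos hc, Prod.mk.injEq]; omega
  · rw [if_neg hc, show (r - 9568) - 354 = r - 9922 from by omega]
    exact pvYSeg29 r (by omega) h1

theorem pvYSeg27 (r : Int) (hs : 9214 ≤ r) (h1 : r < 10631) :
    pvYearWalk [27,28,29,30] 0 (r - 9214) = ((30 * r + 10645) / 10631, r - (354 * ((30 * r + 10645) / 10631 - 1) + (11 * ((30 * r + 10645) / 10631 - 1) + 15) / 30)) := by
  rw [pvYearWalk, show pvDaysInYear ((0:Int) + 27) = 354 from by decide]
  by_cases hc : (r - 9214) < 354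
  · rw [if_pos hc, Prod.mk.injEq]; omega
  · rw [if_neg hc, show (r - 9214) - 354 = r - 9568 from by omega]
    exact pvYSeg28 r (by omega) h1

theorem pvYSeg26 (r : Int) (hs : 8859 ≤ r) (h1 : r < 10631) :
    pvYearWalk [26,27,28,29,30] 0 (r - 8859) = ((30 * r + 10645) / 10631, r - (354 * ((30 * r + 10645) / 10631 - 1) + (11 * ((30 * r + 10645) / 10631 - 1) + 15) / 30)) := by
  rw [pvYearWalk, show pvDaysInYear ((0:Int) + 26) = 355 from by decide]
  by_cases hc : (r - 8859) < 355
  · rw [if_pos hc, Prod.mk.injEq]; omega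
  · rw [if_neg hc, show (r - 8859) - 355 = r - 9214 from by omega]
    exact pvYSeg27 r (by omega) h1

theorem pvYSeg25 (r : Int) (hs : 8505 ≤ r) (h1 : r < 10631) :
    pvYearWalk [25,26,27,28,29,30] 0 (r - 8505) = ((30 * r + 10645) / 10631, r - (354 * ((30 * r + 10645) / 10631 - 1) + (11 * ((30 * r + 10645) / 10631 - 1) + 15) / 30)) := by
  rw [pvYearWalk, show pvDaysInYear ((0:Int) + 25) = 354 from by decide]
  by_cases hc : (r - 8505) < 354
  · rw [if_pos hc, Prod.mk.injEq]; omega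
  · rw [if_neg hc, show (r - 8505) - 354 = r - 8859 from by omega]
    exact pvYSeg26 r (by omega) h1

theorem pvYSeg24 (r : Int) (hs : 8150 ≤ r) (h1 : r < 10631) :
    pvYearWalk [24,25,26,27,28,29,30] 0 (r - 8150) = ((30 * r + 10645) / 10631, r - (354 * ((30 * r + 10645) / 10631 - 1) + (11 * ((30 * r + 10645) / 10631 - 1) + 15) / 30)) := by
  rw [pvYearWalk, show pvDaysInYear ((0:Int) + 24) = 355 from by decide]
  by_cases hc : (r - 8150) < 355
  · rw [if_pos hc, Prod.mk.injEq]; omega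
  · rw [if_neg hc, show (r - 8150) - 355 = r - 8505 from by omega]
    exact pvYSeg25 r (by omega) h1

theorem pvYSeg23 (r : Int) (hs : 7796 ≤ r) (h1 : r < 10631) :
    pvYearWalk [23,24,25,26,27,28,29,30] 0 (r - 7796) = ((30 * r + 10645) / 10631, r - (354 * ((30 * r + 10645) / 10631 - 1) + (11 * ((30 * r + 10645) / 10631 - 1) + 15) / 30)) := by
  rw [pvYearWalk, show pvDaysInYear ((0:Int) + 23) = 354 from by decide]
  by_cases hc : (r - 7796) < 354
  · rw [if_pos hc, Prod.mk.injEq]; omega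
  · rw [if_neg hc, show (r - 7796) - 354 = r - 8150 from by omega]
    exact pvYSeg24 r (by omega) h1

theorem pvYSeg22 (r : Int) (hs : 7442 ≤ r) (h1 : r < 10631) :
    pvYearWalk [22,23,24,25,26,27,28,29,30] 0 (r - 7442) = ((30 * r + 10645) / 10631, r - (354 * ((30 * r + 10645) / 10631 - 1) + (11 * ((30 * r + 10645) / 10631 - 1) + 15) / 30)) := by
  rw [pvYearWalk, show pvDaysInYear ((0:Int) + 22) = 354 from by decide]
  by_cases hc : (r - 7442) < 354
  · rw [if_pos hc, Prod.mk.injEq]; omega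
  · rw [if_neg hc, show (r - 7442) - 354 = r - 7796 from by omega]
    exact pvYSeg23 r (by omega) h1

theorem pvYSeg21 (r : Int) (hs : 7087 ≤ r) (h1 : r < 10631) :
    pvYearWalk [21,22,23,24,25,26,27,28,29,30] 0 (r - 7087) = ((30 * r + 10645) / 10631, r - (354 * ((30 * r + 10645) / 10631 - 1) + (11 * ((30 * r + 10645) / 10631 - 1) + 15) / 30)) := by
  rw [pvYearWalk, show pvDaysInYear ((0:Int) + 21) = 355 from by decide]
  by_cases hc : (r - 7087) < 355
  · rw [if_pos hc, Prod.mk.injEq]; omega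
  · rw [if_neg hc, show (r - 7087) - 355 = r - 7442 from by omega]
    exact pvYSeg22 r (by omega) h1

theorem pvYSeg20 (r : Int) (hs : 6733 ≤ r) (h1 : r < 10631) :
    pvYearWalk [20,21,22,23,24,25,26,27,28,29,30] 0 (r - 6733) = ((30 * r + 10645) / 10631, r - (354 * ((30 * r + 10645) / 10631 - 1) + (11 * ((30 * r + 10645) / 10631 - 1) + 15) / 30)) := by
  rw [pvYearWalk, show pvDaysInYear ((0:Int) + 20) = 354 from by decide]
  by_cases hc : (r - 6733) < 354
  · rw [if_pos hc, Prod.mk.injEq]; omega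
  · rw [if_neg hc, show (r - 6733) - 354 = r - 7087 from by omega]
    exact pvYSeg21 r (by omega) h1

theorem pvYSeg19 (r : Int) (hs : 6379 ≤ r) (h1 : r < 10631) :
    pvYearWalk [19,20,21,22,23,24,25,26,27,28,29,30] 0 (r - 6379) = ((30 * r + 10645) / 10631, r - (354 * ((30 * r + 10645) / 10631 - 1) + (11 * ((30 * r + 10645) / 10631 - 1) + 15) / 30)) := by
  rw [pvYearWalk, show pvDaysInYear ((0:Int) + 19) = 354 from by decide]
  by_cases hc : (r - 6379) < 354
  · rw [if_pos hc, Prod.mk.injEq]; omega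
  · rw [if_neg hc, show (r - 6379) - 354 = r - 6733 from by omega]
    exact pvYSeg20 r (by omega) h1

theorem pvYSeg18 (r : Int) (hs : 6024 ≤ r) (h1 : r < 10631) :
    pvYearWalk [18,19,20,21,22,23,24,25,26,27,28,29,30] 0 (r - 6024) = ((30 * r + 10645) / 10631, r - (354 * ((30 * r + 10645) / 10631 - 1) + (11 * ((30 * r + 10645) / 10631 - 1) + 15) / 30)) := by
  rw [pvYearWalk, show pvDaysInYear ((0:Int) + 18) = 355 from by decide]
  by_cases hc : (r - 6024) < 355
  · rw [if_pos hc, Prod.mk.injEq]; omega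
  · rw [if_neg hc, show (r - 6024) - 355 = r - 6379 from by omega]
    exact pvYSeg19 r (by omega) h1

theorem pvYSeg17 (r : Int) (hs : 5670 ≤ r) (h1 : r < 10631) :
    pvYearWalk [17,18,19,20,21,22,23,24,25,26,27,28,29,30] 0 (r - 5670) = ((30 * r + 10645) / 10631, r - (354 * ((30 * r + 10645) / 10631 - 1) + (11 * ((30 * r + 10645) / 10631 - 1) + 15) / 30)) := by
  rw [pvYearWalk, show pvDaysInYear ((0:Int) + 17) = 354 from by decide]
  by_cases hc : (r - 5670) < 354
  · rw [if_pos hc, Prod.mk.injEq]; omega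
  · rw [if_neg hc, show (r - 5670) - 354 = r - 6024 from by omega]
    exact pvYSeg18 r (by omega) h1

theorem pvYSeg16 (r : Int) (hs : 5316 ≤ r) (h1 : r < 10631) :
    pvYearWalk [16,17,18,19,20,21,22,23,24,25,26,27,28,29,30] 0 (r - 5316) = ((30 * r + 10645) / 10631, r - (354 * ((30 * r + 10645) / 10631 - 1) + (11 * ((30 * r + 10645) / 10631 - 1) + 15) / 30)) := by
  rw [pvYearWalk, show pvDaysInYear ((0:Int) + 16) = 354 from by decide]
  by_cases hc : (r - 5316) < 354
  · rw [if_pos hc, Prod.mk.injEq]; omega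
  · rw [if_neg hc, show (r - 5316) - 354 = r - 5670 from by omega]
    exact pvYSeg17 r (by omega) h1

theorem pvYSeg15 (r : Int) (hs : 4961 ≤ r) (h1 : r < 10631) :
    pvYearWalk [15,16,17,18,19,20,21,22,23,24,25,26,27,28,29,30] 0 (r - 4961) = ((30 * r + 10645) / 10631, r - (354 * ((30 * r + 10645) / 10631 - 1) + (11 * ((30 * r + 10645) / 10631 - 1) + 15) / 30)) := by
  rw [pvYearWalk, show pvDaysInYear ((0:Int) + 15) = 355 from by decide]
  by_cases hc : (r - 4961) < 355
  · rw [if_pos hc, Prod.mk.injEq]; omega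
  · rw [if_neg hc, show (r - 4961) - 355 = r - 5316 from by omega]
    exact pvYSeg16 r (by omega) h1

theorem pvYSeg14 (r : Int) (hs : 4607 ≤ r) (h1 : r < 10631) :
    pvYearWalk [14,15,16,17,18,19,20,21,22,23,24,25,26,27,28,29,30] 0 (r - 4607) = ((30 * r + 10645) / 10631, r - (354 * ((30 * r + 10645) / 10631 - 1) + (11 * ((30 * r + 10645) / 10631 - 1) + 15) / 30)) := by
  rw [pvYearWalk, show pvDaysInYear ((0:Int) + 14) = 354 from by decide]
  by_cases hc : (r - 4607) < 354
  · rw [if_pos hc, Prod.mk.injEq]; omega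
  · rw [if_neg hc, show (r - 4607) - 354 = r - 4961 from by omega]
    exact pvYSeg15 r (by omega) h1

theorem pvYSeg13 (r : Int) (hs : 4252 ≤ r) (h1 : r < 10631) :
    pvYearWalk [13,14,15,16,17,18,19,20,21,22,23,24,25,26,27,28,29,30] 0 (r - 4252) = ((30 * r + 10645) / 10631, r - (354 * ((30 * r + 10645) / 10631 - 1) + (11 * ((30 * r + 10645) / 10631 - 1) + 15) / 30)) := by
  rw [pvYearWalk, show pvDaysInYear ((0:Int) + 13) = 355 from by decide]
  by_cases hc : (r - 4252) < 355
  · rw [if_pos hc, Prod.mk.injEq]; omega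
  · rw [if_neg hc, show (r - 4252) - 355 = r - 4607 from by omega]
    exact pvYSeg14 r (by omega) h1

theorem pvYSeg12 (r : Int) (hs : 3898 ≤ r) (h1 : r < 10631) :
    pvYearWalk [12,13,14,15,16,17,18,19,20,21,22,23,24,25,26,27,28,29,30] 0 (r - 3898) = ((30 * r + 10645) / 10631, r - (354 * ((30 * r + 10645) / 10631 - 1) + (11 * ((30 * r + 10645) / 10631 - 1) + 15) / 30)) := by
  rw [pvYearWalk, show pvDaysInYear ((0:Int) + 12) = 354 from by decide]
  by_cases hc : (r - 3898) < 354
  · rw [if_pos hc, Prod.mk.injEq]; omega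
  · rw [if_neg hc, show (r - 3898) - 354 = r - 4252 from by omega]
    exact pvYSeg13 r (by omega) h1

theorem pvYSeg11 (r : Int) (hs : 3544 ≤ r) (h1 : r < 10631) :
    pvYearWalk [11,12,13,14,15,16,17,18,19,20,21,22,23,24,25,26,27,28,29,30] 0 (r - 3544) = ((30 * r + 10645) / 10631, r - (354 * ((30 * r + 10645) / 10631 - 1) + (11 * ((30 * r + 10645) / 10631 - 1) + 15) / 30)) := by
  rw [pvYearWalk, show pvDaysInYear ((0:Int) + 11) = 354 from by decide]
  by_cases hc : (r - 3544) < 354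
  · rw [if_pos hc, Prod.mk.injEq]; omega
  · rw [if_neg hc, show (r - 3544) - 354 = r - 3898 from by omega]
    exact pvYSeg12 r (by omega) h1

theorem pvYSeg10 (r : Int) (hs : 3189 ≤ r) (h1 : r < 10631) :
    pvYearWalk [10,11,12,13,14,15,16,17,18,19,20,21,22,23,24,25,26,27,28,29,30] 0 (r - 3189) = ((30 * r + 10645) / 10631, r - (354 * ((30 * r + 10645) / 10631 - 1) + (11 * ((30 * r + 10645) / 10631 - 1) + 15) / 30)) := by
  rw [pvYearWalk, show pvDaysInYear ((0:Int) + 10) = 355 from by decide]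
  by_cases hc : (r - 3189) < 355
  · rw [if_pos hc, Prod.mk.injEq]; omega
  · rw [if_neg hc, show (r - 3189) - 355 = r - 3544 from by omega]
    exact pvYSeg11 r (by omega) h1

theorem pvYSeg9 (r : Int) (hs : 2835 ≤ r) (h1 : r < 10631) :
    pvYearWalk [9,10,11,12,13,14,15,16,17,18,19,20,21,22,23,24,25,26,27,28,29,30] 0 (r - 2835) = ((30 * r + 10645) / 10631, r - (354 * ((30 * r + 10645) / 10631 - 1) + (11 * ((30 * r + 10645) / 10631 - 1) + 15) / 30)) := by
  rw [pvYearWalk, show pvDaysInYear ((0:Int) + 9) = 354 from by decide]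
  by_cases hc : (r - 2835) < 354
  · rw [if_pos hc, Prod.mk.injEq]; omega
  · rw [if_neg hc, show (r - 2835) - 354 = r - 3189 from by omega]
    exact pvYSeg10 r (by omega) h1

theorem pvYSeg8 (r : Int) (hs : 2481 ≤ r) (h1 : r < 10631) :
    pvYearWalk [8,9,10,11,12,13,14,15,16,17,18,19,20,21,22,23,24,25,26,27,28,29,30] 0 (r - 2481) = ((30 * r + 10645) / 10631, r - (354 * ((30 * r + 10645) / 10631 - 1) + (11 * ((30 * r + 10645) / 10631 - 1) + 15) / 30)) := by
  rw [pvYearWalk, show pvDaysInYear ((0:Int) + 8) = 354 from by decide]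
  by_cases hc : (r - 2481) < 354
  · rw [if_pos hc, Prod.mk.injEq]; omega
  · rw [if_neg hc, show (r - 2481) - 354 = r - 2835 from by omega]
    exact pvYSeg9 r (by omega) h1

theorem pvYSeg7 (r : Int) (hs : 2126 ≤ r) (h1 : r < 10631) :
    pvYearWalk [7,8,9,10,11,12,13,14,15,16,17,18,19,20,21,22,23,24,25,26,27,28,29,30] 0 (r - 2126) = ((30 * r + 10645) / 10631, r - (354 * ((30 * r + 10645) / 10631 - 1) + (11 * ((30 * r + 10645) / 10631 - 1) + 15) / 30)) := by
  rw [pvYearWalk, show pvDaysInYear ((0:Int) + 7) = 355 from by decide]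
  by_cases hc : (r - 2126) < 355
  · rw [if_pos hc, Prod.mk.injEq]; omega
  · rw [if_neg hc, show (r - 2126) - 355 = r - 2481 from by omega]
    exact pvYSeg8 r (by omega) h1

theorem pvYSeg6 (r : Int) (hs : 1772 ≤ r) (h1 : r < 10631) :
    pvYearWalk [6,7,8,9,10,11,12,13,14,15,16,17,18,19,20,21,22,23,24,25,26,27,28,29,30] 0 (r - 1772) = ((30 * r + 10645) / 10631, r - (354 * ((30 * r + 10645) / 10631 - 1) + (11 * ((30 * r + 10645) / 10631 - 1) + 15) / 30)) := by
  rw [pvYearWalk, show pvDaysInYear ((0:Int) + 6) = 354 from by decide]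
  by_cases hc : (r - 1772) < 354
  · rw [if_pos hc, Prod.mk.injEq]; omega
  · rw [if_neg hc, show (r - 1772) - 354 = r - 2126 from by omega]
    exact pvYSeg7 r (by omega) h1

theorem pvYSeg5 (r : Int) (hs : 1417 ≤ r) (h1 : r < 10631) :
    pvYearWalk [5,6,7,8,9,10,11,12,13,14,15,16,17,18,19,20,21,22,23,24,25,26,27,28,29,30] 0 (r - 1417) = ((30 * r + 10645) / 10631, r - (354 * ((30 * r + 10645) / 10631 - 1) + (11 * ((30 * r + 10645) / 10631 - 1) + 15) / 30)) := by
  rw [pvYearWalk, show pvDaysInYear ((0:Int) + 5) = 355 from by decide]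
  by_cases hc : (r - 1417) < 355
  · rw [if_pos hc, Prod.mk.injEq]; omega
  · rw [if_neg hc, show (r - 1417) - 355 = r - 1772 from by omega]
    exact pvYSeg6 r (by omega) h1

theorem pvYSeg4 (r : Int) (hs : 1063 ≤ r) (h1 : r < 10631) :
    pvYearWalk [4,5,6,7,8,9,10,11,12,13,14,15,16,17,18,19,20,21,22,23,24,25,26,27,28,29,30] 0 (r - 1063) = ((30 * r + 10645) / 10631, r - (354 * ((30 * r + 10645) / 10631 - 1) + (11 * ((30 * r + 10645) / 10631 - 1) + 15) / 30)) := by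
  rw [pvYearWalk, show pvDaysInYear ((0:Int) + 4) = 354 from by decide]
  by_cases hc : (r - 1063) < 354
  · rw [if_pos hc, Prod.mk.injEq]; omega
  · rw [if_neg hc, show (r - 1063) - 354 = r - 1417 from by omega]
    exact pvYSeg5 r (by omega) h1

theorem pvYSeg3 (r : Int) (hs : 709 ≤ r) (h1 : r < 10631) :
    pvYearWalk [3,4,5,6,7,8,9,10,11,12,13,14,15,16,17,18,19,20,21,22,23,24,25,26,27,28,29,30] 0 (r - 709) = ((30 * r + 10645) / 10631, r - (354 * ((30 * r + 10645) / 10631 - 1) + (11 * ((30 * r + 10645) / 10631 - 1) + 15) / 30)) := by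
  rw [pvYearWalk, show pvDaysInYear ((0:Int) + 3) = 354 from by decide]
  by_cases hc : (r - 709) < 354
  · rw [if_pos hc, Prod.mk.injEq]; omega
  · rw [if_neg hc, show (r - 709) - 354 = r - 1063 from by omega]
    exact pvYSeg4 r (by omega) h1

theorem pvYSeg2 (r : Int) (hs : 354 ≤ r) (h1 : r < 10631) :
    pvYearWalk [2,3,4,5,6,7,8,9,10,11,12,13,14,15,16,17,18,19,20,21,22,23,24,25,26,27,28,29,30] 0 (r - 354) = ((30 * r + 10645) / 10631, r - (354 * ((30 * r + 10645) / 10631 - 1) + (11 * ((30 * r + 10645) / 10631 - 1) + 15) / 30)) := by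
  rw [pvYearWalk, show pvDaysInYear ((0:Int) + 2) = 355 from by decide]
  by_cases hc : (r - 354) < 355
  · rw [if_pos hc, Prod.mk.injEq]; omega
  · rw [if_neg hc, show (r - 354) - 355 = r - 709 from by omega]
    exact pvYSeg3 r (by omega) h1

theorem pvYSeg1 (r : Int) (hs : 0 ≤ r) (h1 : r < 10631) :
    pvYearWalk [1,2,3,4,5,6,7,8,9,10,11,12,13,14,15,16,17,18,19,20,21,22,23,24,25,26,27,28,29,30] 0 r = ((30 * r + 10645) / 10631, r - (354 * ((30 * r + 10645) / 10631 - 1) + (11 * ((30 * r + 10645) / 10631 - 1) + 15) / 30)) := by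
  rw [pvYearWalk, show pvDaysInYear ((0:Int) + 1) = 354 from by decide]
  by_cases hc : r < 354
  · rw [if_pos hc, Prod.mk.injEq]; omega
  · rw [if_neg hc, show r - 354 = r - 354 from by omega]
    exact pvYSeg2 r (by omega) h1

-- the month walk on the suffix starting at month k, one lemma per month
theorem pvMSeg12 (y d : Int) (hs : 325 ≤ d) (h1 : d < 355)
    (h2 : pvIsLeap y = false → d < 354) :
    pvMonthWalk [12] y (d - 325) = (if 325 ≤ d then ((12:Int), d - 325) else ((2 * d) / 59 + 1, d - (59 * ((2 * d) / 59 + 1 - 1) + 1) / 2)) := by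
  rw [pvMonthWalk, if_pos (show (325:Int) ≤ d from hs)]
  by_cases hL : pvIsLeap y = true
  · rw [show pvDaysInMonth y (12:Int) = 30 from by
        unfold pvDaysInMonth; rw [if_neg (by decide), if_pos (by simp [hL])]]
    rw [if_pos (by omega)]
  · rw [Bool.not_eq_true] at hL
    have := h2 hL
    rw [show pvDaysInMonth y (12:Int) = 29 from by
        unfold pvDaysInMonth; rw [if_neg (by decide), if_neg (by simp [hL])]]
    rw [if_pos (by omega)]

theorem pvMSeg11 (y d : Int) (hs : 295 ≤ d) (h1 : d < 355)
    (h2 : pvIsLeap y = false → d < 354) :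
    pvMonthWalk [11,12] y (d - 295) = (if 325 ≤ d then ((12:Int), d - 325) else ((2 * d) / 59 + 1, d - (59 * ((2 * d) / 59 + 1 - 1) + 1) / 2)) := by
  rw [pvMonthWalk, show pvDaysInMonth y (11:Int) = 30 from by unfold pvDaysInMonth; rw [if_pos (by decide)]]
  by_cases hc : (d - 295) < 30
  · rw [if_pos hc, if_neg (show ¬ (325:Int) ≤ d by omega), Prod.mk.injEq]; omega
  · rw [if_neg hc, show (d - 295) - 30 = d - 325 from by omega]
    exact pvMSeg12 y d (by omega) h1 h2

theorem pvMSeg10 (y d : Int) (hs : 266 ≤ d) (h1 : d < 355)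
    (h2 : pvIsLeap y = false → d < 354) :
    pvMonthWalk [10,11,12] y (d - 266) = (if 325 ≤ d then ((12:Int), d - 325) else ((2 * d) / 59 + 1, d - (59 * ((2 * d) / 59 + 1 - 1) + 1) / 2)) := by
  rw [pvMonthWalk, show pvDaysInMonth y (10:Int) = 29 from by unfold pvDaysInMonth; rw [if_neg (by decide), if_neg (by simp)]]
  by_cases hc : (d - 266) < 29
  · rw [if_pos hc, if_neg (show ¬ (325:Int) ≤ d by omega), Prod.mk.injEq]; omega
  · rw [if_neg hc, show (d - 266) - 29 = d - 295 from by omega]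
    exact pvMSeg11 y d (by omega) h1 h2

theorem pvMSeg9 (y d : Int) (hs : 236 ≤ d) (h1 : d < 355)
    (h2 : pvIsLeap y = false → d < 354) :
    pvMonthWalk [9,10,11,12] y (d - 236) = (if 325 ≤ d then ((12:Int), d - 325) else ((2 * d) / 59 + 1, d - (59 * ((2 * d) / 59 + 1 - 1) + 1) / 2)) := by
  rw [pvMonthWalk, show pvDaysInMonth y (9:Int) = 30 from by unfold pvDaysInMonth; rw [if_pos (by decide)]]
  by_cases hc : (d - 236) < 30
  · rw [if_pos hc, if_neg (show ¬ (325:Int) ≤ d by omega), Prod.mk.injEq]; omega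
  · rw [if_neg hc, show (d - 236) - 30 = d - 266 from by omega]
    exact pvMSeg10 y d (by omega) h1 h2

theorem pvMSeg8 (y d : Int) (hs : 207 ≤ d) (h1 : d < 355)
    (h2 : pvIsLeap y = false → d < 354) :
    pvMonthWalk [8,9,10,11,12] y (d - 207) = (if 325 ≤ d then ((12:Int), d - 325) else ((2 * d) / 59 + 1, d - (59 * ((2 * d) / 59 + 1 - 1) + 1) / 2)) := by
  rw [pvMonthWalk, show pvDaysInMonth y (8:Int) = 29 from by unfold pvDaysInMonth; rw [if_neg (by decide), if_neg (by simp)]]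
  by_cases hc : (d - 207) < 29
  · rw [if_pos hc, if_neg (show ¬ (325:Int) ≤ d by omega), Prod.mk.injEq]; omega
  · rw [if_neg hc, show (d - 207) - 29 = d - 236 from by omega]
    exact pvMSeg9 y d (by omega) h1 h2

theorem pvMSeg7 (y d : Int) (hs : 177 ≤ d) (h1 : d < 355)
    (h2 : pvIsLeap y = false → d < 354) :
    pvMonthWalk [7,8,9,10,11,12] y (d - 177) = (if 325 ≤ d then ((12:Int), d - 325) else ((2 * d) / 59 + 1, d - (59 * ((2 * d) / 59 + 1 - 1) + 1) / 2)) := by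
  rw [pvMonthWalk, show pvDaysInMonth y (7:Int) = 30 from by unfold pvDaysInMonth; rw [if_pos (by decide)]]
  by_cases hc : (d - 177) < 30
  · rw [if_pos hc, if_neg (show ¬ (325:Int) ≤ d by omega), Prod.mk.injEq]; omega
  · rw [if_neg hc, show (d - 177) - 30 = d - 207 from by omega]
    exact pvMSeg8 y d (by omega) h1 h2

theorem pvMSeg6 (y d : Int) (hs : 148 ≤ d) (h1 : d < 355)
    (h2 : pvIsLeap y = false → d < 354) :
    pvMonthWalk [6,7,8,9,10,11,12] y (d - 148) = (if 325 ≤ d then ((12:Int), d - 325) else ((2 * d) / 59 + 1, d - (59 * ((2 * d) / 59 + 1 - 1) + 1) / 2)) := by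
  rw [pvMonthWalk, show pvDaysInMonth y (6:Int) = 29 from by unfold pvDaysInMonth; rw [if_neg (by decide), if_neg (by simp)]]
  by_cases hc : (d - 148) < 29
  · rw [if_pos hc, if_neg (show ¬ (325:Int) ≤ d by omega), Prod.mk.injEq]; omega
  · rw [if_neg hc, show (d - 148) - 29 = d - 177 from by omega]
    exact pvMSeg7 y d (by omega) h1 h2

theorem pvMSeg5 (y d : Int) (hs : 118 ≤ d) (h1 : d < 355)
    (h2 : pvIsLeap y = false → d < 354) :
    pvMonthWalk [5,6,7,8,9,10,11,12] y (d - 118) = (if 325 ≤ d then ((12:Int), d - 325) else ((2 * d) / 59 + 1, d - (59 * ((2 * d) / 59 + 1 - 1) + 1) / 2)) := by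
  rw [pvMonthWalk, show pvDaysInMonth y (5:Int) = 30 from by unfold pvDaysInMonth; rw [if_pos (by decide)]]
  by_cases hc : (d - 118) < 30
  · rw [if_pos hc, if_neg (show ¬ (325:Int) ≤ d by omega), Prod.mk.injEq]; omega
  · rw [if_neg hc, show (d - 118) - 30 = d - 148 from by omega]
    exact pvMSeg6 y d (by omega) h1 h2

theorem pvMSeg4 (y d : Int) (hs : 89 ≤ d) (h1 : d < 355)
    (h2 : pvIsLeap y = false → d < 354) :
    pvMonthWalk [4,5,6,7,8,9,10,11,12] y (d - 89) = (if 325 ≤ d then ((12:Int), d - 325) else ((2 * d) / 59 + 1, d - (59 * ((2 * d) / 59 + 1 - 1) + 1) / 2)) := by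
  rw [pvMonthWalk, show pvDaysInMonth y (4:Int) = 29 from by unfold pvDaysInMonth; rw [if_neg (by decide), if_neg (by simp)]]
  by_cases hc : (d - 89) < 29
  · rw [if_pos hc, if_neg (show ¬ (325:Int) ≤ d by omega), Prod.mk.injEq]; omega
  · rw [if_neg hc, show (d - 89) - 29 = d - 118 from by omega]
    exact pvMSeg5 y d (by omega) h1 h2

theorem pvMSeg3 (y d : Int) (hs : 59 ≤ d) (h1 : d < 355)
    (h2 : pvIsLeap y = false → d < 354) :
    pvMonthWalk [3,4,5,6,7,8,9,10,11,12] y (d - 59) = (if 325 ≤ d then ((12:Int), d - 325) else ((2 * d) / 59 + 1, d - (59 * ((2 * d) / 59 + 1 - 1) + 1) / 2)) := by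
  rw [pvMonthWalk, show pvDaysInMonth y (3:Int) = 30 from by unfold pvDaysInMonth; rw [if_pos (by decide)]]
  by_cases hc : (d - 59) < 30
  · rw [if_pos hc, if_neg (show ¬ (325:Int) ≤ d by omega), Prod.mk.injEq]; omega
  · rw [if_neg hc, show (d - 59) - 30 = d - 89 from by omega]
    exact pvMSeg4 y d (by omega) h1 h2

theorem pvMSeg2 (y d : Int) (hs : 30 ≤ d) (h1 : d < 355)
    (h2 : pvIsLeap y = false → d < 354) :
    pvMonthWalk [2,3,4,5,6,7,8,9,10,11,12] y (d - 30) = (if 325 ≤ d then ((12:Int), d - 325) else ((2 * d) / 59 + 1, d - (59 * ((2 * d) / 59 + 1 - 1) + 1) / 2)) := by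
  rw [pvMonthWalk, show pvDaysInMonth y (2:Int) = 29 from by unfold pvDaysInMonth; rw [if_neg (by decide), if_neg (by simp)]]
  by_cases hc : (d - 30) < 29
  · rw [if_pos hc, if_neg (show ¬ (325:Int) ≤ d by omega), Prod.mk.injEq]; omega
  · rw [if_neg hc, show (d - 30) - 29 = d - 59 from by omega]
    exact pvMSeg3 y d (by omega) h1 h2

theorem pvMSeg1 (y d : Int) (hs : 0 ≤ d) (h1 : d < 355)
    (h2 : pvIsLeap y = false → d < 354) :
    pvMonthWalk [1,2,3,4,5,6,7,8,9,10,11,12] y d = (if 325 ≤ d then ((12:Int), d - 325) else ((2 * d) / 59 + 1, d - (59 * ((2 * d) / 59 + 1 - 1) + 1) / 2)) := by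
  rw [pvMonthWalk, show pvDaysInMonth y (1:Int) = 30 from by unfold pvDaysInMonth; rw [if_pos (by decide)]]
  by_cases hc : d < 30
  · rw [if_pos hc, if_neg (show ¬ (325:Int) ≤ d by omega), Prod.mk.injEq]; omega
  · rw [if_neg hc, show d - 30 = d - 30 from by omega]
    exact pvMSeg2 y d (by omega) h1 h2

-- bounds for the closed-form day-in-year, by cases on the in-cycle year
theorem pvDbounds (r Y D : Int) (h0 : 0 ≤ r) (h1 : r < 10631)
    (hY : Y = (30 * r + 10645) / 10631)
    (hD : D = r - (354 * (Y - 1) + (11 * (Y - 1) + 15) / 30)) :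
    0 ≤ D ∧ D < 355 ∧
      (¬ (Y % 30 = 2 ∨ Y % 30 = 5 ∨ Y % 30 = 7 ∨ Y % 30 = 10 ∨ Y % 30 = 13 ∨ Y % 30 = 15
          ∨ Y % 30 = 18 ∨ Y % 30 = 21 ∨ Y % 30 = 24 ∨ Y % 30 = 26 ∨ Y % 30 = 29) → D < 354) := by
  have hYl : 1 ≤ Y := by omega
  have hYu : Y ≤ 30 := by omega
  interval_cases Y <;> omega

-- ===== VERDICT (by name: the statement is the Claim_ definition above) =====
theorem gregorian_to_hijri_spec : Claim_equal_gregorian_to_hijri := by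
  intro year month day _hdom _hpre
  unfold Spec_gregorian_to_hijri
  simp only [gregorian_to_hijri, gregorian_to_hijri_alt]
  set de := pvJdn year month day - 1948438 with hde
  set c := PySem.Int.floordiv de 10631 with hc
  set r := PySem.Int.mod de 10631 with hrdef
  have hr0 : 0 ≤ r := PySem.Int.mod_nonneg de (by norm_num)
  have hr1 : r < 10631 := PySem.Int.mod_lt de (by norm_num)
  have e1 : ∀ a : Int, PySem.Int.floordiv a 10631 = a / 10631 :=
    fun a => PySem.Int.floordiv_eq_ediv_of_pos (by norm_num)
  have e2 : ∀ a : Int, PySem.Int.floordiv a 30 = a / 30 :=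
    fun a => PySem.Int.floordiv_eq_ediv_of_pos (by norm_num)
  have e3 : ∀ a : Int, PySem.Int.floordiv a 59 = a / 59 :=
    fun a => PySem.Int.floordiv_eq_ediv_of_pos (by norm_num)
  have e4 : ∀ a : Int, PySem.Int.floordiv a 2 = a / 2 :=
    fun a => PySem.Int.floordiv_eq_ediv_of_pos (by norm_num)
  simp only [e1, e2, e3, e4]
  rw [pvRng31, pvRng13]
  rw [show c * 30 = 30 * c + 0 from by ring, pvYearWalk_shift, pvYSeg1 r hr0 hr1]
  dsimp only
  set Y := (30 * r + 10645) / 10631 with hYdef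
  set D := r - (354 * (Y - 1) + (11 * (Y - 1) + 15) / 30) with hDdef
  obtain ⟨hD0, hD1, hD2'⟩ := pvDbounds r Y D hr0 hr1 hYdef hDdef
  have hD2 : pvIsLeap Y = false → D < 354 := by
    intro hf
    refine hD2' ?_
    rw [← pvLeap_iff]
    simp [hf]
  rw [show Y + 30 * c = 30 * c + Y from by ring, pvMonthWalk_shift,
      pvMSeg1 Y D hD0 hD1 hD2]
  by_cases h325 : 325 ≤ D
  · rw [if_pos h325, if_pos h325]
    dsimp only
    exact congrArg₂ Prod.mk (by ring) (congrArg₂ Prod.mk rfl (by ring))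
  · rw [if_neg h325, if_neg h325]
    dsimp only
    exact congrArg₂ Prod.mk (by ring) (congrArg₂ Prod.mk rfl rfl)
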